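-- pv_equiv track=rewrite | github.com/zhudefu-tyut/ACE | test_class.py | process_dict_and_list
-- ===== SOURCE A (Python) =====
-- def process_dict_and_list(data_dict, target_list):
--     list2 = []
--     list3 = []
--
--     for key1, value1 in data_dict.items():
--         if key1 in list2:
--             continue
--         for key2, value2 in data_dict.items():
--             if key1 != key2:
--                 intersection = set(value1) & set(value2)
--                 if intersection and not intersection.issubset(set(target_list)):
--                     if key1 not in list2:
--                         list2.append(key1)
--                     if key2 not in list2:
--                         list2.append(key2)
--                     tuple_to_add = (key1, key2) if (key1, key2) not in list3 else None
--                     if tuple_to_add is not None: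
--                         list3.append(tuple_to_add)
--                     break
--         if key1 not in list2:
--             repeated_numbers = set(value1) & set(target_list)
--             if repeated_numbers.issubset(set(target_list)):
--                 list2.append(key1)
--                 tuple_to_add = (key1,)
--                 if not any(key1 in t for t in list3):
--                     list3.append(tuple_to_add)
--
--     return list3
-- ===== SOURCE B (Python) =====
-- def process_dict_and_list(data_dict, target_list):
--     # Inverted index over off-target elements: each key's earliest partner is
--     # found in O(1) scans of the index instead of a quadratic pairwise scan.
--     kvs = list(data_dict.items())
--     keys = [k for k, _ in kvs]
--     vals = [v for _, v in kvs]
--     tset = set(target_list)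
--     index = {}  # off-target element -> ascending list of key positions holding it
--     for i, v in enumerate(vals):
--         for e in set(v):
--             if e not in tset:
--                 index.setdefault(e, []).append(i)
--
--     def partner(i):
--         best = None
--         for e in set(vals[i]):
--             if e in tset:
--                 continue
--             cand = next((j for j in index[e] if j != i), None)
--             if cand is not None and (best is None or cand < best):
--                 best = cand
--         return best
--
--     covered = set()
--     out = []
--     for i, k in enumerate(keys):
--         if i in covered:
--             continue
--         p = partner(i)
--         if p is None:
--             covered.add(i)
--             out.append((k,))
--         else:
--             covered.add(i)
--             covered.add(p)
--             out.append((k, keys[p]))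
--     return out
-- ===== Notes on version B (the rewrite author's own statement) =====
-- stated objective: faster
-- what changed: Replaces A's quadratic all-pairs set-intersection scan with an inverted index from off-target elements to ascending key positions, reading each key's earliest partner off the index instead of intersecting its values with every other key's.
import Mathlib
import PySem

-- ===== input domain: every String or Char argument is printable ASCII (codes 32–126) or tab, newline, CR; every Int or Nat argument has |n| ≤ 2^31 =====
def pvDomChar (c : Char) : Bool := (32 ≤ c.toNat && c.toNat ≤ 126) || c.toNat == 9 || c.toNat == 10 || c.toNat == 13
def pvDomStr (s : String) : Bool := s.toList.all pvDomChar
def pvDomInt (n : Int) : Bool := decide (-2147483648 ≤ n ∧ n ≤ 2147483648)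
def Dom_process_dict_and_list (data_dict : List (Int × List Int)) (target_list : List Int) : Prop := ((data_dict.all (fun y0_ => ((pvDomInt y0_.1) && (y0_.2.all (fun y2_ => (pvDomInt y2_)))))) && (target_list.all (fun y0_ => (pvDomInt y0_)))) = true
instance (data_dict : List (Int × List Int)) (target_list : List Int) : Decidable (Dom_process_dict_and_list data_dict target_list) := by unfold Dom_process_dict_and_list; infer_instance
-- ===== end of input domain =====

-- B replaces A's quadratic all-pairs set-intersection scan by an inverted index
-- (off-target element → ordered key positions), reading each key's earliest partner
-- off the index; same return value, measured faster on large inputs.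

-- ===== PORT A =====
-- inner `for key2, value2 in data_dict.items(): … break` loop of A
def pvAInner (key1 : Int) (value1 : List Int) (target_list : List Int)
    (list2 : List Int) (list3 : List (List Int)) :
    List (Int × List Int) → List Int × List (List Int)
  | [] => (list2, list3)
  | (key2, value2) :: rest =>
    if key1 ≠ key2 then
      let intersection := PySem.Set.inter (PySem.Set.ofList value1) (PySem.Set.ofList value2)
      if intersection ≠ [] ∧ ¬ (PySem.Set.issubset intersection (PySem.Set.ofList target_list) = true) then
        let list2a := if key1 ∉ list2 then list2 ++ [key1] else list2
        let list2b := if key2 ∉ list2a then list2a ++ [key2] else list2a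
        let list3a := if [key1, key2] ∉ list3 then list3 ++ [[key1, key2]] else list3
        (list2b, list3a)
      else pvAInner key1 value1 target_list list2 list3 rest
    else pvAInner key1 value1 target_list list2 list3 rest

-- body of A's outer `for key1, value1 in data_dict.items():` loop
def pvAStep (items : List (Int × List Int)) (target_list : List Int)
    (st : List Int × List (List Int)) (kv : Int × List Int) : List Int × List (List Int) :=
  if kv.1 ∈ st.1 then st
  else
    let st' := pvAInner kv.1 kv.2 target_list st.1 st.2 items
    if kv.1 ∉ st'.1 then
      let repeated := PySem.Set.inter (PySem.Set.ofList kv.2) (PySem.Set.ofList target_list)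
      if PySem.Set.issubset repeated (PySem.Set.ofList target_list) = true then
        (st'.1 ++ [kv.1], if ¬ (st'.2.any (fun t => kv.1 ∈ t)) then st'.2 ++ [[kv.1]] else st'.2)
      else st'
    else st'

def process_dict_and_list (data_dict : List (Int × List Int)) (target_list : List Int) : List (List Int) :=
  let items := (PySem.Dict.ofList data_dict).items
  (items.foldl (pvAStep items target_list) ([], [])).2

-- ===== PORT B =====
-- Source B: index = {}; for i, v in enumerate(vals): for e in set(v): if e not in tset: index.setdefault(e, []).append(i)
def pvBIndex (tset : PySem.Set Int) (vals : List (List Int)) : PySem.Dict Int (List Nat) :=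
  (vals.zipIdx.flatMap (fun vi =>
      ((PySem.Set.ofList vi.1).filter (fun e => !PySem.Set.contains tset e)).map (fun e => (e, vi.2)))).foldl
    (fun d p => d.modify p.1 [] (· ++ [p.2])) PySem.Dict.empty

-- Source B: def partner(i): …
def pvBPartner (tset : PySem.Set Int) (index : PySem.Dict Int (List Nat))
    (vals : List (List Int)) (i : Nat) : Option Nat :=
  (PySem.Set.ofList (vals.getD i [])).foldl (fun best e =>
    if PySem.Set.contains tset e then best
    else
      match (index.getD e []).find? (fun j => decide (j ≠ i)) with
      | none => best
      | some c =>
        match best with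
        | none => some c
        | some b => if c < b then some c else some b) none

-- Source B: body of the final `for i, k in enumerate(keys):` loop
def pvBStep (tset : PySem.Set Int) (index : PySem.Dict Int (List Nat))
    (vals : List (List Int)) (keys : List Int)
    (st : PySem.Set Nat × List (List Int)) (ki : Int × Nat) : PySem.Set Nat × List (List Int) :=
  if PySem.Set.contains st.1 ki.2 then st
  else
    match pvBPartner tset index vals ki.2 with
    | none => (PySem.Set.add st.1 ki.2, st.2 ++ [[ki.1]])
    | some p => (PySem.Set.add (PySem.Set.add st.1 ki.2) p, st.2 ++ [[ki.1, keys.getD p 0]])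

def process_dict_and_list_alt (data_dict : List (Int × List Int)) (target_list : List Int) : List (List Int) :=
  let kvs := (PySem.Dict.ofList data_dict).items
  let keys := kvs.map (·.1)
  let vals := kvs.map (·.2)
  let tset := PySem.Set.ofList target_list
  let index := pvBIndex tset vals
  (keys.zipIdx.foldl (pvBStep tset index vals keys) (PySem.Set.empty, [])).2

-- ===== PRECONDITION & SPEC =====
def Spec_process_dict_and_list (data_dict : List (Int × List Int)) (target_list : List Int) (out : List (List Int)) : Prop := out = process_dict_and_list_alt data_dict target_list
instance (data_dict : List (Int × List Int)) (target_list : List Int) (out : List (List Int)) : Decidable (Spec_process_dict_and_list data_dict target_list out) := by unfold Spec_process_dict_and_list; infer_instance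

-- ===== CLAIM (what is proved, stated in full; the proofs are below) =====
def Claim_equal_process_dict_and_list : Prop := ∀ (data_dict : List (Int × List Int)) (target_list : List Int), Dom_process_dict_and_list data_dict target_list → Spec_process_dict_and_list data_dict target_list (process_dict_and_list data_dict target_list)

-- ===== LEMMAS AND PROOFS =====

-- "value1 and value2 share an element outside target_list"
def shareB (tgt v1 v2 : List Int) : Bool := v1.any (fun e => v2.contains e && !tgt.contains e)

-- position of the earliest partner of position i (the reference both loops are reduced to)
def refPartner (tgt : List Int) (vals : List (List Int)) (i : Nat) : Option Nat :=
  (List.range vals.length).find? (fun j => decide (j ≠ i) && shareB tgt (vals.getD i []) (vals.getD j []))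

-- ascending positions of the off-target element e
def posOf (tgt : List Int) (vals : List (List Int)) (e : Int) : List Nat :=
  vals.zipIdx.filterMap (fun vi => if e ∈ vi.1 ∧ e ∉ tgt then some vi.2 else none)

def omin : Option Nat → Option Nat → Option Nat
  | none, c => c
  | some b, none => some b
  | some b, some c => if c < b then some c else some b

-- the candidate B's partner fold computes for element e
def pvCand (tset : PySem.Set Int) (index : PySem.Dict Int (List Nat)) (i : Nat) (e : Int) : Option Nat :=
  if PySem.Set.contains tset e then none
  else (index.getD e []).find? (fun j => decide (j ≠ i))

-- invariant tying A's (list2, list3) to B's (covered, out)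
def pvInv (keys : List Int) (l2 : List Int) (l3 : List (List Int))
    (cov : List Nat) (out : List (List Int)) : Prop :=
  l3 = out ∧ l2 = cov.map (fun j => keys.getD j 0) ∧ (∀ j ∈ cov, j < keys.length) ∧
    (∀ t ∈ l3, ∀ x ∈ t, x ∈ l2)

lemma share_iff (tgt v1 v2 : List Int) :
    shareB tgt v1 v2 = true ↔ ∃ e, e ∈ v1 ∧ e ∈ v2 ∧ e ∉ tgt := by
  simp only [shareB, List.any_eq_true, Bool.and_eq_true, List.contains_iff_mem,
    Bool.not_eq_true', ← Bool.not_eq_true, List.contains_iff_mem]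

lemma cond_iff (tgt v1 v2 : List Int) :
    (PySem.Set.inter (PySem.Set.ofList v1) (PySem.Set.ofList v2) ≠ [] ∧
      ¬ (PySem.Set.issubset (PySem.Set.inter (PySem.Set.ofList v1) (PySem.Set.ofList v2))
          (PySem.Set.ofList tgt) = true)) ↔ shareB tgt v1 v2 = true := by
  rw [share_iff]
  constructor
  · rintro ⟨-, hnsub⟩
    rw [PySem.Set.issubset_iff] at hnsub
    push Not at hnsub
    obtain ⟨x, hx, hnx⟩ := hnsub
    rw [PySem.Set.mem_inter] at hx
    rw [PySem.Set.mem_ofList] at hx hx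
    refine ⟨x, ?_, ?_, ?_⟩
    · simpa [PySem.Set.mem_ofList] using hx.1
    · simpa [PySem.Set.mem_ofList] using hx.2
    · simpa [PySem.Set.mem_ofList] using hnx
  · rintro ⟨e, h1, h2, h3⟩
    have hmem : e ∈ PySem.Set.inter (PySem.Set.ofList v1) (PySem.Set.ofList v2) := by
      rw [PySem.Set.mem_inter]
      exact ⟨(PySem.Set.mem_ofList _ _).mpr h1, (PySem.Set.mem_ofList _ _).mpr h2⟩
    refine ⟨List.ne_nil_of_mem hmem, ?_⟩
    intro hsub
    rw [PySem.Set.issubset_iff] at hsub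
    exact h3 ((PySem.Set.mem_ofList _ _).mp (hsub _ hmem))

lemma pvAInner_eq (key1 : Int) (v1 tgt : List Int) (l2 : List Int) (l3 : List (List Int))
    (kvs : List (Int × List Int)) :
    pvAInner key1 v1 tgt l2 l3 kvs =
      match kvs.find? (fun kv => decide (key1 ≠ kv.1) && shareB tgt v1 kv.2) with
      | none => (l2, l3)
      | some kv =>
        let l2a := if key1 ∉ l2 then l2 ++ [key1] else l2
        let l2b := if kv.1 ∉ l2a then l2a ++ [kv.1] else l2a
        (l2b, if [key1, kv.1] ∉ l3 then l3 ++ [[key1, kv.1]] else l3) := by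
  induction kvs with
  | nil => simp [pvAInner]
  | cons kv rest ih =>
    obtain ⟨key2, v2⟩ := kv
    rw [List.find?_cons]
    by_cases h1 : key1 = key2
    · subst h1
      simp only [pvAInner, ne_eq, not_true_eq_false, if_false, decide_not]
      simpa using ih
    · by_cases h2 : shareB tgt v1 v2 = true
      · have hc := (cond_iff tgt v1 v2).mpr h2
        simp only [pvAInner, ne_eq, h1, not_false_eq_true, if_true, if_pos hc]
        simp [h2]
      · have hc : ¬ (PySem.Set.inter (PySem.Set.ofList v1) (PySem.Set.ofList v2) ≠ [] ∧
            ¬ (PySem.Set.issubset (PySem.Set.inter (PySem.Set.ofList v1) (PySem.Set.ofList v2))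
              (PySem.Set.ofList tgt) = true)) := fun h => h2 ((cond_iff tgt v1 v2).mp h)
        simp only [pvAInner, ne_eq, h1, not_false_eq_true, if_true, if_neg hc]
        simp only [h2]
        simpa [h1] using ih

lemma find?_congr_mem {α : Type} (l : List α) (p q : α → Bool) (h : ∀ a ∈ l, p a = q a) :
    l.find? p = l.find? q := by
  induction l with
  | nil => rfl
  | cons a l ih =>
    rw [List.find?_cons, List.find?_cons, h a (by simp)]
    cases hq : q a with
    | true => rfl
    | false => exact ih (fun b hb => h b (List.mem_cons_of_mem _ hb))

lemma find?_eq_range {α : Type} (l : List α) (q : α → Bool) (d : α) :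
    l.find? q = ((List.range l.length).find? (fun j => q (l.getD j d))).map (fun j => l.getD j d) := by
  induction l generalizing q with
  | nil => rfl
  | cons a l ih =>
    rw [List.length_cons, List.range_succ_eq_map, List.find?_cons, List.find?_cons]
    cases hq : q a with
    | true => simp [hq]
    | false =>
      simp only [List.getD_cons_zero, hq]
      rw [List.find?_map, Option.map_map]
      rw [show ((fun j => (a :: l).getD j d) ∘ Nat.succ) = (fun j => l.getD j d) from by
        funext j; simp]
      rw [find?_congr_mem (List.range l.length)
        ((fun j => q ((a :: l).getD j d)) ∘ Nat.succ) (fun j => q (l.getD j d))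
        (fun j _ => by simp)]
      exact ih q

lemma inner_ref (kvs : List (Int × List Int)) (tgt : List Int)
    (hnd : (kvs.map (·.1)).Nodup) (i : Nat) (hi : i < kvs.length)
    (key1 : Int) (v1 : List Int) (hkv : kvs[i] = (key1, v1))
    (l2 : List Int) (l3 : List (List Int)) :
    pvAInner key1 v1 tgt l2 l3 kvs =
      match refPartner tgt (kvs.map (·.2)) i with
      | none => (l2, l3)
      | some p =>
        let key2 := (kvs.map (·.1)).getD p 0
        let l2a := if key1 ∉ l2 then l2 ++ [key1] else l2
        let l2b := if key2 ∉ l2a then l2a ++ [key2] else l2a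
        (l2b, if [key1, key2] ∉ l3 then l3 ++ [[key1, key2]] else l3) := by
  rw [pvAInner_eq, find?_eq_range kvs _ ((0 : Int), ([] : List Int))]
  have hpred : ∀ j ∈ List.range kvs.length,
      (fun j => decide (key1 ≠ (kvs.getD j ((0 : Int), ([] : List Int))).1)
        && shareB tgt v1 (kvs.getD j ((0 : Int), ([] : List Int))).2) j
      = (fun j => decide (j ≠ i)
        && shareB tgt ((kvs.map (·.2)).getD i []) ((kvs.map (·.2)).getD j [])) j := by
    intro j hj
    have hj' := List.mem_range.mp hj
    have h1 : kvs.getD j ((0 : Int), ([] : List Int)) = kvs[j] := List.getD_eq_getElem _ _ hj'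
    have h2 : (kvs.map (·.2)).getD j [] = kvs[j].2 := by
      rw [List.getD_eq_getElem _ _ (by simpa using hj')]; simp
    have h3 : (kvs.map (·.2)).getD i [] = kvs[i].2 := by
      rw [List.getD_eq_getElem _ _ (by simpa using hi)]; simp
    have hv1 : v1 = kvs[i].2 := by rw [hkv]
    have hkey : key1 = kvs[i].1 := by rw [hkv]
    have hne : (key1 ≠ kvs[j].1) ↔ (j ≠ i) := by
      rw [hkey]
      constructor
      · intro h hji
        subst hji
        exact h rfl
      · intro h heq
        apply h
        have hmi : (kvs.map (·.1))[i]'(by simpa using hi) = kvs[i].1 := by simp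
        have hmj : (kvs.map (·.1))[j]'(by simpa using hj') = kvs[j].1 := by simp
        exact ((hnd.getElem_inj_iff).mp (by rw [hmj, hmi, ← heq])).symm
    simp only [h1, h2, h3, ← hv1]
    congr 1
    simp only [decide_eq_decide]
    exact hne
  rw [find?_congr_mem _ _ _ hpred]
  unfold refPartner
  simp only [List.length_map]
  cases hfind : (List.range kvs.length).find?
      (fun j => decide (j ≠ i)
        && shareB tgt ((kvs.map (·.2)).getD i []) ((kvs.map (·.2)).getD j [])) with
  | none => rfl
  | some p =>
    have hp : p < kvs.length := List.mem_range.mp (List.mem_of_find?_eq_some hfind)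
    simp only [Option.map_some]
    have hfst : (kvs.getD p ((0 : Int), ([] : List Int))).1 = (kvs.map (·.1)).getD p 0 := by
      rw [List.getD_eq_getElem _ _ hp, List.getD_eq_getElem _ _ (by simpa using hp)]; simp
    simp only [hfst]

lemma filter_beq_nodup (l : List Int) (c : Int → Bool) (e : Int) (hl : l.Nodup) :
    l.filter (fun x => x == e && c x) = if e ∈ l ∧ c e = true then [e] else [] := by
  induction l with
  | nil => simp
  | cons a l ih =>
    rw [List.nodup_cons] at hl
    rw [List.filter_cons]
    by_cases hae : a = e
    · subst hae
      have htail : l.filter (fun x => x == a && c x) = [] := by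
        rw [List.filter_eq_nil_iff]
        intro x hx
        have : x ≠ a := fun hxa => hl.1 (hxa ▸ hx)
        simp [this]
      cases hc : c a with
      | true => simp [htail]
      | false => simp [htail, fun h : a ∈ l => hl.1 h]
    · have : (a == e && c a) = false := by
        simp [hae]
      rw [this, ih hl.2]
      by_cases he : e ∈ l <;> simp [he, Ne.symm hae]

lemma filterMap_if_eq_filter_map {α β : Type} (l : List α) (p : α → Prop) [DecidablePred p]
    (f : α → β) :
    l.filterMap (fun a => if p a then some (f a) else none) = (l.filter (fun a => decide (p a))).map f := by
  induction l with
  | nil => rfl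
  | cons a l ih =>
    rw [List.filterMap_cons, List.filter_cons]
    by_cases hp : p a <;> simp [hp, ih]

lemma piece_eq (tgt : List Int) (e : Int) (v : List Int) (k : Nat) :
    ((((PySem.Set.ofList v).filter (fun x => !PySem.Set.contains (PySem.Set.ofList tgt) x)).map
        (fun x => (x, k))).filter (fun p => p.1 == e)).map (fun x => x.2) =
      if e ∈ v ∧ e ∉ tgt then [k] else [] := by
  rw [List.filter_map, List.map_map]
  have h1 : ((fun p : Int × Nat => p.1 == e) ∘ fun x => (x, k)) = fun x => x == e := rfl
  rw [h1, List.filter_filter]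
  rw [filter_beq_nodup (PySem.Set.ofList v) _ e (PySem.Set.nodup_ofList v)]
  have hcond : (e ∈ PySem.Set.ofList v ∧ (!PySem.Set.contains (PySem.Set.ofList tgt) e) = true)
      ↔ (e ∈ v ∧ e ∉ tgt) := by
    rw [PySem.Set.mem_ofList, Bool.not_eq_true', ← Bool.not_eq_true, PySem.Set.contains_iff,
      PySem.Set.mem_ofList]
  rw [if_congr hcond rfl rfl]
  by_cases hc : e ∈ v ∧ e ∉ tgt <;> simp [hc]

lemma index_getD (tgt : List Int) (vals : List (List Int)) (e : Int) :
    (pvBIndex (PySem.Set.ofList tgt) vals).getD e [] = posOf tgt vals e := by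
  unfold pvBIndex posOf
  rw [PySem.Dict.getD_foldl_modify_append, PySem.Dict.getD_empty, List.nil_append]
  rw [List.filter_flatMap, List.map_flatMap]
  generalize vals.zipIdx = l
  induction l with
  | nil => rfl
  | cons vi l ih =>
    rw [List.flatMap_cons, List.filterMap_cons]
    rw [piece_eq tgt e vi.1 vi.2]
    by_cases hc : e ∈ vi.1 ∧ e ∉ tgt
    · simp only [if_pos hc, ih]
      rfl
    · simp only [if_neg hc, ih, List.nil_append]

lemma posOf_mem (tgt : List Int) (vals : List (List Int)) (e : Int) (j : Nat) :
    j ∈ posOf tgt vals e ↔ ∃ h : j < vals.length, e ∈ vals[j] ∧ e ∉ tgt := by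
  unfold posOf
  rw [List.mem_filterMap]
  constructor
  · rintro ⟨⟨v, j'⟩, hmem, hf⟩
    by_cases hc : e ∈ v ∧ e ∉ tgt
    · simp only [if_pos hc] at hf
      obtain rfl : j' = j := by simpa using hf
      obtain ⟨-, hlt, hv⟩ := List.mem_zipIdx hmem
      simp only [Nat.zero_add, Nat.sub_zero] at hlt hv
      exact ⟨hlt, hv ▸ hc.1, hc.2⟩
    · simp [if_neg hc] at hf
  · rintro ⟨hj, hv, ht⟩
    refine ⟨(vals[j], j), ?_, by simp [hv, ht]⟩
    have : vals.zipIdx 0 = vals.zipIdx := rfl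
    have hg : (vals.zipIdx)[j]'(by simpa using hj) = (vals[j], j) := by
      simp [List.getElem_zipIdx]
    exact hg ▸ List.getElem_mem _


lemma zipIdx_pairwise {α : Type} (l : List α) (k : Nat) :
    (l.zipIdx k).Pairwise (fun a b => a.2 < b.2) := by
  induction l generalizing k with
  | nil => simp
  | cons a l ih =>
    rw [List.zipIdx_cons]
    exact List.Pairwise.cons (fun b hb => Nat.lt_of_lt_of_le (Nat.lt_succ_self k)
      (List.le_snd_of_mem_zipIdx hb)) (ih (k+1))

lemma posOf_pairwise (tgt : List Int) (vals : List (List Int)) (e : Int) :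
    (posOf tgt vals e).Pairwise (· < ·) := by
  unfold posOf
  rw [filterMap_if_eq_filter_map]
  rw [List.pairwise_map]
  exact List.Pairwise.filter _ (zipIdx_pairwise vals 0)

lemma find?_min_of_pairwise (l : List Nat) (hl : l.Pairwise (· < ·)) (q : Nat → Bool) (c : Nat)
    (h : l.find? q = some c) : c ∈ l ∧ q c = true ∧ ∀ b ∈ l, q b = true → c ≤ b := by
  rw [List.find?_eq_some_iff_append] at h
  obtain ⟨hqc, as, bs, rfl, hfail⟩ := h
  refine ⟨by simp, hqc, ?_⟩
  intro b hb hqb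
  rcases List.mem_append.mp hb with hb | hb
  · exact absurd hqb (by simpa using hfail b hb)
  · rcases List.mem_cons.mp hb with rfl | hb
    · exact Nat.le_refl _
    · rw [List.pairwise_append] at hl
      exact Nat.le_of_lt (List.rel_of_pairwise_cons hl.2.1 hb)

lemma foldl_omin_eq (l : List (Option Nat)) (b : Option Nat) :
    l.foldl omin b = (b.toList ++ l.filterMap id).min? := by
  induction l generalizing b with
  | nil => cases b <;> simp
  | cons o l ih =>
    rw [List.foldl_cons, ih]
    have hsplit : (o :: l).filterMap id = o.toList ++ l.filterMap id := by
      cases o <;> simp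
    rw [hsplit]
    cases b with
    | none => cases o <;> rfl
    | some y =>
      cases o with
      | none => rfl
      | some z =>
        have homin : omin (some y) (some z) = some (if z < y then z else y) := by
          rw [show omin (some y) (some z) = if z < y then some z else some y from rfl]
          split_ifs <;> rfl
        rw [homin]
        show ((if z < y then z else y) :: l.filterMap id).min? = (y :: z :: l.filterMap id).min?
        rw [List.min?_cons', List.min?_cons', List.foldl_cons]
        have : (if z < y then z else y) = min y z := by
          rw [Nat.min_def]; split_ifs <;> omega
        rw [this]

lemma foldl_omin_some (l : List (Option Nat)) (b : Option Nat) (m : Nat) :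
    l.foldl omin b = some m ↔
      ((b = some m ∨ some m ∈ l) ∧ (∀ x, b = some x → m ≤ x) ∧ (∀ x, some x ∈ l → m ≤ x)) := by
  rw [foldl_omin_eq, List.min?_eq_some_iff]
  simp only [List.mem_append, Option.mem_toList, List.mem_filterMap, id_eq]
  constructor
  · rintro ⟨h1, h2⟩
    refine ⟨?_, ?_, ?_⟩
    · rcases h1 with h1 | ⟨o, ho, rfl⟩
      · exact Or.inl h1
      · exact Or.inr ho
    · intro x hx; exact h2 x (Or.inl hx)
    · intro x hx; exact h2 x (Or.inr ⟨some x, hx, rfl⟩)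
  · rintro ⟨h1, h2, h3⟩
    refine ⟨?_, ?_⟩
    · rcases h1 with h1 | h1
      · exact Or.inl h1
      · exact Or.inr ⟨some m, h1, rfl⟩
    · rintro x (hx | ⟨o, ho, rfl⟩)
      · exact h2 x hx
      · exact h3 x ho

lemma foldl_omin_none (l : List (Option Nat)) (b : Option Nat) :
    l.foldl omin b = none ↔ (b = none ∧ ∀ x ∈ l, x = none) := by
  rw [foldl_omin_eq, List.min?_eq_none_iff, List.append_eq_nil_iff]
  constructor
  · rintro ⟨h1, h2⟩
    refine ⟨by cases b <;> simp_all, ?_⟩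
    intro x hx
    cases x with
    | none => rfl
    | some y =>
      exfalso
      have hy : y ∈ l.filterMap id := List.mem_filterMap.mpr ⟨some y, hx, rfl⟩
      rw [h2] at hy
      simp at hy
  · rintro ⟨rfl, h2⟩
    refine ⟨rfl, ?_⟩
    rw [List.filterMap_eq_nil_iff]
    intro o ho
    rw [h2 o ho]; rfl

lemma pvBPartner_eq_fold (tset : PySem.Set Int) (index : PySem.Dict Int (List Nat))
    (vals : List (List Int)) (i : Nat) :
    pvBPartner tset index vals i =
      ((PySem.Set.ofList (vals.getD i [])).map (pvCand tset index i)).foldl omin none := by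
  unfold pvBPartner
  rw [List.foldl_map]
  congr 1
  funext best e
  unfold pvCand omin
  by_cases hc : PySem.Set.contains tset e = true
  · simp only [hc, if_true]
    cases best <;> rfl
  · simp only [Bool.not_eq_true] at hc
    simp only [hc, Bool.false_eq_true, if_false]
    cases hf : (index.getD e []).find? (fun j => decide (j ≠ i)) <;> cases best <;> rfl

lemma refPartner_lt (tgt : List Int) (vals : List (List Int)) (i p : Nat)
    (h : refPartner tgt vals i = some p) :
    p < vals.length ∧ p ≠ i ∧ shareB tgt (vals.getD i []) (vals.getD p []) = true := by
  unfold refPartner at h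
  have hm := List.mem_of_find?_eq_some h
  have hq := List.find?_some h
  simp only [Bool.and_eq_true, decide_eq_true_eq] at hq
  exact ⟨List.mem_range.mp hm, hq.1, hq.2⟩

lemma cand_facts (tgt : List Int) (vals : List (List Int)) (i : Nat) (e : Int) (c : Nat)
    (h : pvCand (PySem.Set.ofList tgt) (pvBIndex (PySem.Set.ofList tgt) vals) i e = some c) :
    e ∉ tgt ∧ c ∈ posOf tgt vals e ∧ c ≠ i ∧ ∀ b ∈ posOf tgt vals e, b ≠ i → c ≤ b := by
  unfold pvCand at h
  by_cases hc : PySem.Set.contains (PySem.Set.ofList tgt) e = true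
  · rw [if_pos hc] at h; cases h
  · rw [if_neg hc, index_getD] at h
    have hmin := find?_min_of_pairwise _ (posOf_pairwise tgt vals e) _ _ h
    have hci : c ≠ i := by simpa using List.find?_some h
    refine ⟨?_, hmin.1, hci, ?_⟩
    · intro he
      exact hc ((PySem.Set.contains_iff _ _).mpr ((PySem.Set.mem_ofList _ _).mpr he))
    · intro b hb hbi
      exact hmin.2.2 b hb (by simpa using hbi)

lemma cand_of_share (tgt : List Int) (vals : List (List Int)) (i q : Nat)
    (hq : q < vals.length) (hqi : q ≠ i)
    (hs : shareB tgt (vals.getD i []) (vals.getD q []) = true) :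
    ∃ e ∈ PySem.Set.ofList (vals.getD i []), ∃ c,
      pvCand (PySem.Set.ofList tgt) (pvBIndex (PySem.Set.ofList tgt) vals) i e = some c
        ∧ c ≤ q := by
  obtain ⟨e, he1, he2, he3⟩ := (share_iff _ _ _).mp hs
  have heS : e ∈ PySem.Set.ofList (vals.getD i []) := (PySem.Set.mem_ofList _ _).mpr he1
  have hqpos : q ∈ posOf tgt vals e := by
    rw [posOf_mem]
    refine ⟨hq, ?_, he3⟩
    rwa [← List.getD_eq_getElem _ ([] : List Int) hq]
  have hcontains : ¬ (PySem.Set.contains (PySem.Set.ofList tgt) e = true) := by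
    rw [PySem.Set.contains_iff, PySem.Set.mem_ofList]; exact he3
  have hfind : (posOf tgt vals e).find? (fun j => decide (j ≠ i)) ≠ none := by
    intro hnone
    rw [List.find?_eq_none] at hnone
    exact (hnone q hqpos) (by simp [hqi])
  obtain ⟨c, hc⟩ := Option.ne_none_iff_exists'.mp hfind
  have hmin := find?_min_of_pairwise _ (posOf_pairwise tgt vals e) _ _ hc
  refine ⟨e, heS, c, ?_, hmin.2.2 q hqpos (by simpa using hqi)⟩
  unfold pvCand
  rw [if_neg hcontains, index_getD]
  exact hc

lemma cand_share (tgt : List Int) (vals : List (List Int)) (i : Nat) (e : Int) (c : Nat)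
    (heS : e ∈ PySem.Set.ofList (vals.getD i []))
    (h : pvCand (PySem.Set.ofList tgt) (pvBIndex (PySem.Set.ofList tgt) vals) i e = some c) :
    c < vals.length ∧ c ≠ i ∧ shareB tgt (vals.getD i []) (vals.getD c []) = true := by
  obtain ⟨ht, hpos, hci, -⟩ := cand_facts tgt vals i e c h
  obtain ⟨hlt, hv, -⟩ := (posOf_mem tgt vals e c).mp hpos
  refine ⟨hlt, hci, (share_iff _ _ _).mpr ⟨e, (PySem.Set.mem_ofList _ _).mp heS, ?_, ht⟩⟩
  rwa [List.getD_eq_getElem _ _ hlt]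

lemma partner_eq (tgt : List Int) (vals : List (List Int)) (i : Nat) :
    pvBPartner (PySem.Set.ofList tgt) (pvBIndex (PySem.Set.ofList tgt) vals) vals i =
      refPartner tgt vals i := by
  rw [pvBPartner_eq_fold]
  cases hB : (((PySem.Set.ofList (vals.getD i [])).map
      (pvCand (PySem.Set.ofList tgt) (pvBIndex (PySem.Set.ofList tgt) vals) i)).foldl
      omin none) with
  | none =>
    cases hR : refPartner tgt vals i with
    | none => rfl
    | some p =>
      exfalso
      obtain ⟨hp, hpi, hps⟩ := refPartner_lt tgt vals i p hR
      obtain ⟨e, heS, c, hc, -⟩ := cand_of_share tgt vals i p hp hpi hps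
      have hall := (foldl_omin_none _ _).mp hB
      have hmem : pvCand (PySem.Set.ofList tgt) (pvBIndex (PySem.Set.ofList tgt) vals) i e
          ∈ (PySem.Set.ofList (vals.getD i [])).map
            (pvCand (PySem.Set.ofList tgt) (pvBIndex (PySem.Set.ofList tgt) vals) i) :=
        List.mem_map_of_mem heS
      have := hall.2 _ hmem
      rw [hc] at this
      cases this
  | some m =>
    obtain ⟨h1, -, h3⟩ := (foldl_omin_some _ _ _).mp hB
    have hmemC : some m ∈ (PySem.Set.ofList (vals.getD i [])).map
        (pvCand (PySem.Set.ofList tgt) (pvBIndex (PySem.Set.ofList tgt) vals) i) := by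
      rcases h1 with h1 | h1
      · cases h1
      · exact h1
    obtain ⟨e, heS, hce⟩ := List.mem_map.mp hmemC
    obtain ⟨hmlt, hmi, hms⟩ := cand_share tgt vals i e m heS hce
    cases hR : refPartner tgt vals i with
    | none =>
      exfalso
      unfold refPartner at hR
      rw [List.find?_eq_none] at hR
      exact hR m (List.mem_range.mpr hmlt)
        (by simp only [Bool.and_eq_true, decide_eq_true_eq]; exact ⟨hmi, hms⟩)
    | some p =>
      obtain ⟨hp, hpi, hps⟩ := refPartner_lt tgt vals i p hR
      have hR' := hR
      unfold refPartner at hR'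
      have hminR := find?_min_of_pairwise _ List.pairwise_lt_range _ _ hR'
      have hpm : p ≤ m := hminR.2.2 m (List.mem_range.mpr hmlt)
        (by simp only [Bool.and_eq_true, decide_eq_true_eq]; exact ⟨hmi, hms⟩)
      obtain ⟨e', heS', c', hc', hcp⟩ := cand_of_share tgt vals i p hp hpi hps
      have hmc : m ≤ c' := by
        apply h3
        rw [← hc']
        exact List.mem_map_of_mem heS'
      exact congrArg some (Nat.le_antisymm (by omega) (by omega)).symm

lemma step_eq (kvs : List (Int × List Int)) (tgt : List Int)
    (hnd : (kvs.map (·.1)).Nodup) (i : Nat) (hi : i < kvs.length)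
    (l2 : List Int) (l3 : List (List Int)) (cov : List Nat) (out : List (List Int))
    (hInv : pvInv (kvs.map (·.1)) l2 l3 cov out) :
    pvInv (kvs.map (·.1))
      (pvAStep kvs tgt (l2, l3) kvs[i]).1 (pvAStep kvs tgt (l2, l3) kvs[i]).2
      (pvBStep (PySem.Set.ofList tgt) (pvBIndex (PySem.Set.ofList tgt) (kvs.map (·.2)))
        (kvs.map (·.2)) (kvs.map (·.1)) (cov, out) (kvs[i].1, i)).1
      (pvBStep (PySem.Set.ofList tgt) (pvBIndex (PySem.Set.ofList tgt) (kvs.map (·.2)))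
        (kvs.map (·.2)) (kvs.map (·.1)) (cov, out) (kvs[i].1, i)).2 := by
  obtain ⟨hout, hmap, hlt, hcl⟩ := hInv
  have hgetD : ∀ (j : Nat) (hj : j < kvs.length), (kvs.map (·.1)).getD j 0 = kvs[j].1 := by
    intro j hj
    rw [List.getD_eq_getElem _ _ (by simpa using hj)]; simp
  have hinj : ∀ (j j' : Nat) (hj : j < kvs.length) (hj' : j' < kvs.length),
      kvs[j].1 = kvs[j'].1 → j = j' := by
    intro j j' hj hj' heq
    have hmj : (kvs.map (·.1))[j]'(by simpa using hj) = kvs[j].1 := by simp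
    have hmj' : (kvs.map (·.1))[j']'(by simpa using hj') = kvs[j'].1 := by simp
    exact (hnd.getElem_inj_iff).mp (by rw [hmj, hmj', heq])
  have hmemg : ∀ (j : Nat) (hj : j < kvs.length), (kvs[j].1 ∈ l2 ↔ j ∈ cov) := by
    intro j hj
    rw [hmap]
    constructor
    · intro hm
      obtain ⟨j', hj', hj'eq⟩ := List.mem_map.mp hm
      have hj'lt : j' < kvs.length := by simpa using hlt j' hj'
      rw [hgetD j' hj'lt] at hj'eq
      rwa [hinj j' j hj'lt hj hj'eq] at hj'
    · intro hm
      exact List.mem_map.mpr ⟨j, hm, hgetD j hj⟩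
  simp only [pvAStep, pvBStep]
  by_cases hcov : i ∈ cov
  · have hk1 : kvs[i].1 ∈ l2 := (hmemg i hi).mpr hcov
    rw [if_pos hk1, if_pos ((PySem.Set.contains_iff _ _).mpr hcov)]
    exact ⟨hout, hmap, hlt, hcl⟩
  · have hk1 : kvs[i].1 ∉ l2 := fun h => hcov ((hmemg i hi).mp h)
    have hcF : ¬ (PySem.Set.contains cov i = true) := fun h =>
      hcov ((PySem.Set.contains_iff _ _).mp h)
    rw [if_neg hk1, if_neg hcF]
    rw [inner_ref kvs tgt hnd i hi kvs[i].1 kvs[i].2 rfl l2 l3]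
    rw [partner_eq tgt (kvs.map (·.2)) i]
    cases hr : refPartner tgt (kvs.map (·.2)) i with
    | none =>
      simp only []
      rw [if_pos hk1]
      have hsub : PySem.Set.issubset
          (PySem.Set.inter (PySem.Set.ofList kvs[i].2) (PySem.Set.ofList tgt))
          (PySem.Set.ofList tgt) = true := by
        rw [PySem.Set.issubset_iff]
        intro x hx
        exact ((PySem.Set.mem_inter _ _ _).mp hx).2
      rw [if_pos hsub]
      have hany : (l3.any (fun t => decide (kvs[i].1 ∈ t))) = false := by
        rw [List.any_eq_false]
        intro t ht
        simp only [decide_eq_true_eq]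
        intro hmem
        exact hk1 (hcl t ht _ hmem)
      rw [if_pos (by simp [hany])]
      refine ⟨by rw [hout], ?_, ?_, ?_⟩
      · rw [PySem.Set.add_of_not_mem hcov, List.map_append, hmap, List.map_cons, List.map_nil,
          hgetD i hi]
      · intro j hj
        rw [PySem.Set.add_of_not_mem hcov] at hj
        rcases List.mem_append.mp hj with h | h
        · exact hlt j h
        · simp only [List.mem_singleton] at h
          subst h
          simpa using hi
      · intro t ht x hx
        rcases List.mem_append.mp ht with h | h
        · exact List.mem_append_left _ (hcl t h x hx)
        · simp only [List.mem_singleton] at h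
          subst h
          simp only [List.mem_singleton] at hx
          subst hx
          exact List.mem_append_right _ (by simp)
    | some p =>
      obtain ⟨hplt', hpi, -⟩ := refPartner_lt tgt (kvs.map (·.2)) i p hr
      have hp : p < kvs.length := by simpa using hplt'
      have hk2 : (kvs.map (·.1)).getD p 0 = kvs[p].1 := hgetD p hp
      have hk2ne : kvs[p].1 ≠ kvs[i].1 := fun h => hpi (hinj p i hp hi h)
      simp only [hk2]
      rw [if_pos hk1]
      have hpair : [kvs[i].1, kvs[p].1] ∉ l3 := fun h => hk1 (hcl _ h _ (by simp))
      rw [if_pos hpair]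
      have hmemA : kvs[i].1 ∈ l2 ++ [kvs[i].1] := List.mem_append_right _ (by simp)
      have hcovadd : PySem.Set.add cov i = cov ++ [i] := PySem.Set.add_of_not_mem hcov
      by_cases hpcov : p ∈ cov
      · have hk2in : kvs[p].1 ∈ l2 ++ [kvs[i].1] :=
          List.mem_append_left _ ((hmemg p hp).mpr hpcov)
        rw [if_neg (not_not_intro hk2in)]
        rw [if_neg (not_not_intro hmemA)]
        have hpadd : PySem.Set.add (cov ++ [i]) p = cov ++ [i] :=
          PySem.Set.add_of_mem (List.mem_append_left _ hpcov)
        rw [hcovadd, hpadd]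
        refine ⟨by rw [hout], ?_, ?_, ?_⟩
        · rw [List.map_append, hmap, List.map_cons, List.map_nil, hgetD i hi]
        · intro j hj
          rcases List.mem_append.mp hj with h | h
          · exact hlt j h
          · simp only [List.mem_singleton] at h
            subst h
            simpa using hi
        · intro t ht x hx
          rcases List.mem_append.mp ht with h | h
          · exact List.mem_append_left _ (hcl t h x hx)
          · simp only [List.mem_singleton] at h
            subst h
            rcases List.mem_cons.mp hx with rfl | hx
            · exact hmemA
            · simp only [List.mem_singleton] at hx
              subst hx
              exact List.mem_append_left _ ((hmemg p hp).mpr hpcov)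
      · have hk2notin : kvs[p].1 ∉ l2 ++ [kvs[i].1] := by
          intro h
          rcases List.mem_append.mp h with h | h
          · exact hpcov ((hmemg p hp).mp h)
          · simp only [List.mem_singleton] at h
            exact hk2ne h
        rw [if_pos hk2notin]
        rw [if_neg (not_not_intro (List.mem_append_left _ hmemA))]
        have hpadd : PySem.Set.add (cov ++ [i]) p = (cov ++ [i]) ++ [p] := by
          apply PySem.Set.add_of_not_mem
          intro h
          rcases List.mem_append.mp h with h | h
          · exact hpcov h
          · simp only [List.mem_singleton] at h
            exact hpi h
        rw [hcovadd, hpadd]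
        refine ⟨by rw [hout], ?_, ?_, ?_⟩
        · rw [List.map_append, List.map_append, hmap, List.map_cons, List.map_nil,
            List.map_cons, List.map_nil, hgetD i hi, hgetD p hp]
        · intro j hj
          rcases List.mem_append.mp hj with h | h
          · rcases List.mem_append.mp h with h | h
            · exact hlt j h
            · simp only [List.mem_singleton] at h
              subst h
              simpa using hi
          · simp only [List.mem_singleton] at h
            subst h
            simpa using hp
        · intro t ht x hx
          rcases List.mem_append.mp ht with h | h
          · exact List.mem_append_left _ (List.mem_append_left _ (hcl t h x hx))
          · simp only [List.mem_singleton] at h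
            subst h
            rcases List.mem_cons.mp hx with rfl | hx
            · exact List.mem_append_left _ hmemA
            · simp only [List.mem_singleton] at hx
              subst hx
              exact List.mem_append_right _ (by simp)

lemma loop_eq (kvs : List (Int × List Int)) (tgt : List Int)
    (hnd : (kvs.map (·.1)).Nodup) :
    ∀ (rest : List (Int × List Int)) (i : Nat), kvs.drop i = rest →
    ∀ (l2 : List Int) (l3 : List (List Int)) (cov : List Nat) (out : List (List Int)),
      pvInv (kvs.map (·.1)) l2 l3 cov out →
      (rest.foldl (pvAStep kvs tgt) (l2, l3)).2 =
        (((rest.map (·.1)).zipIdx i).foldl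
          (pvBStep (PySem.Set.ofList tgt) (pvBIndex (PySem.Set.ofList tgt) (kvs.map (·.2)))
            (kvs.map (·.2)) (kvs.map (·.1))) (cov, out)).2 := by
  intro rest
  induction rest with
  | nil =>
    intro i hdrop l2 l3 cov out hInv
    simpa using hInv.1
  | cons kv rest' ih =>
    intro i hdrop l2 l3 cov out hInv
    have hi : i < kvs.length := by
      by_contra h
      rw [List.drop_eq_nil_of_le (by omega)] at hdrop
      exact absurd hdrop (by simp)
    have hcons := List.drop_eq_getElem_cons hi
    rw [hdrop] at hcons
    injection hcons with h1 h2
    subst h1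
    rw [List.foldl_cons, List.map_cons, List.zipIdx_cons, List.foldl_cons]
    have hstep := step_eq kvs tgt hnd i hi l2 l3 cov out hInv
    exact ih (i + 1) h2.symm _ _ _ _ hstep

-- ===== VERDICT (by name: the statement is the Claim_ definition above) =====
theorem process_dict_and_list_spec : Claim_equal_process_dict_and_list := by
  intro data_dict target_list _
  unfold Spec_process_dict_and_list process_dict_and_list process_dict_and_list_alt
  have hnd : (((PySem.Dict.ofList data_dict).items).map (·.1)).Nodup := by
    have h := PySem.Dict.nodup_keys_ofList data_dict
    simpa [PySem.Dict.keys] using h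
  exact loop_eq ((PySem.Dict.ofList data_dict).items) target_list hnd
    ((PySem.Dict.ofList data_dict).items) 0 (by simp)
    [] [] [] [] ⟨rfl, rfl, by simp, by simp⟩
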